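-- pv_equiv track=rewrite | github.com/EdwardJoko/Project-Euler | Active/Python/P009.py | compute
-- ===== SOURCE A (Python) =====
-- def compute(sum_of_pythagorean: int) -> str:
--     a: int = sum_of_pythagorean - 2
--     while a > 1:
--         b: int = 1
--         while b <= (sum_of_pythagorean - a) // 2:
--             c: int = sum_of_pythagorean - a - b
--
--             if (a * a) == (b * b) + (c * c):
--                 return str(a * b * c)
--
--             b += 1
--         a -= 1
-- ===== SOURCE B (Python) =====
-- def _isqrt(n):
--     lo, hi = 0, n + 1
--     while hi - lo > 1:
--         mid = (lo + hi) // 2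
--         if mid * mid <= n:
--             lo = mid
--         else:
--             hi = mid
--     return lo
--
--
-- def compute(sum_of_pythagorean: int) -> str:
--     s = sum_of_pythagorean
--     for a in range(s - 2, 1, -1):
--         m = s - a
--         disc = 2 * a * a - m * m
--         if disc < 0:
--             continue
--         d = _isqrt(disc)
--         if d * d != disc:
--             continue
--         if (m - d) % 2 != 0:
--             continue
--         b = (m - d) // 2
--         if b >= 1:
--             return str(a * b * (m - b))
--     return None
-- ===== Notes on version B (the rewrite author's own statement) =====
-- stated objective: faster
-- what changed: The inner linear scan over b is replaced by solving the quadratic b^2+(s-a-b)^2=a^2 in closed form: b=(m-isqrt(2a^2-m^2))/2 with a binary-search integer square root, turning O(n^2) into O(n log n).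
import Mathlib
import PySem

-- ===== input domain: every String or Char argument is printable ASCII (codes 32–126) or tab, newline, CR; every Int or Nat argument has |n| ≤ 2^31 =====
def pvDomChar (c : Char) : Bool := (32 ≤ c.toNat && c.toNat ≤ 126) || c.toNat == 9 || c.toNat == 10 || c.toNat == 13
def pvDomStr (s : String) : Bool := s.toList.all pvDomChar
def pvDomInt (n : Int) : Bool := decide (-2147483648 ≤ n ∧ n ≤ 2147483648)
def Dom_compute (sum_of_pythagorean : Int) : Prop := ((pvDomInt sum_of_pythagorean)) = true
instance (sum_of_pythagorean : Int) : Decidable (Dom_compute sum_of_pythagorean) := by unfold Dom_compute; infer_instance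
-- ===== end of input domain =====

-- B replaces A's inner linear scan over b by the closed-form root b = (m - isqrt(2*a*a - m*m))/2
-- of b^2 + (m-b)^2 = a^2, m = s - a, with a binary-search integer square root; objective: faster.
-- (Loops are ported as structural recursion on a Nat fuel equal to the loop's iteration bound.)

-- ===== PORT A =====
-- inner 'while b <= (s - a) // 2' loop; fuel = number of remaining iterations
def innerGo (s a : Int) : Nat → Int → Option String
  | 0, _ => none
  | k + 1, b =>
    if b ≤ PySem.Int.floordiv (s - a) 2 then
      let c := s - a - b
      if a * a = b * b + c * c then some (PySem.Int.toStr (a * b * c))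
      else innerGo s a k (b + 1)
    else none

def computeInner (s a b : Int) : Option String :=
  innerGo s a (PySem.Int.floordiv (s - a) 2 + 1 - b).toNat b

-- outer 'while a > 1' loop; fuel = number of remaining iterations
def outerGo (s : Int) : Nat → Int → Option String
  | 0, _ => none
  | k + 1, a =>
    if a > 1 then
      match computeInner s a 1 with
      | some r => some r
      | none => outerGo s k (a - 1)
    else none

def compute (sum_of_pythagorean : Int) : Option String :=
  outerGo sum_of_pythagorean (sum_of_pythagorean - 2 - 1).toNat (sum_of_pythagorean - 2)

-- ===== PORT B =====
-- binary-search isqrt: 'while hi - lo > 1'; fuel = hi - lo bounds the iteration count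
def isqrtGo (n : Int) : Nat → Int → Int → Int
  | 0, lo, _ => lo
  | k + 1, lo, hi =>
    if hi - lo > 1 then
      let mid := PySem.Int.floordiv (lo + hi) 2
      if mid * mid ≤ n then isqrtGo n k mid hi else isqrtGo n k lo mid
    else lo

def isqrt (n : Int) : Int := isqrtGo n (n + 1 - 0).toNat 0 (n + 1)

-- 'for a in range(s - 2, 1, -1)'; fuel = number of remaining iterations
def altGo (s : Int) : Nat → Int → Option String
  | 0, _ => none
  | k + 1, a =>
    if a > 1 then
      let m := s - a
      let disc := 2 * a * a - m * m
      if disc < 0 then altGo s k (a - 1)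
      else
        let d := isqrt disc
        if d * d ≠ disc then altGo s k (a - 1)
        else if PySem.Int.mod (m - d) 2 ≠ 0 then altGo s k (a - 1)
        else
          let b := PySem.Int.floordiv (m - d) 2
          if 1 ≤ b then some (PySem.Int.toStr (a * b * (m - b)))
          else altGo s k (a - 1)
    else none

def compute_alt (sum_of_pythagorean : Int) : Option String :=
  altGo sum_of_pythagorean (sum_of_pythagorean - 2 - 1).toNat (sum_of_pythagorean - 2)

-- ===== PRECONDITION & SPEC =====
def Spec_compute (sum_of_pythagorean : Int) (out : Option String) : Prop := out = compute_alt sum_of_pythagorean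
instance (sum_of_pythagorean : Int) (out : Option String) : Decidable (Spec_compute sum_of_pythagorean out) := by unfold Spec_compute; infer_instance

-- ===== CLAIM (what is proved, stated in full; the proofs are below) =====
def Claim_equal_compute : Prop := ∀ (sum_of_pythagorean : Int), Dom_compute sum_of_pythagorean → Spec_compute sum_of_pythagorean (compute sum_of_pythagorean)

-- ===== LEMMAS AND PROOFS =====

theorem isqrtGo_spec (n : Int) : ∀ (k : Nat) (lo hi : Int), (hi - lo).toNat ≤ k →
    0 ≤ lo → lo * lo ≤ n → n < hi * hi → lo < hi →
    0 ≤ isqrtGo n k lo hi ∧ isqrtGo n k lo hi * isqrtGo n k lo hi ≤ n ∧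
      n < (isqrtGo n k lo hi + 1) * (isqrtGo n k lo hi + 1) := by
  intro k
  induction k with
  | zero => intro lo hi hk h0 h1 h2 h3; omega
  | succ k ih =>
    intro lo hi hk h0 h1 h2 h3
    show _ ∧ _
    rw [isqrtGo]
    have hmid : PySem.Int.floordiv (lo + hi) 2 = (lo + hi) / 2 :=
      PySem.Int.floordiv_eq_ediv_of_pos (by norm_num)
    by_cases hg : hi - lo > 1
    · rw [if_pos hg]
      simp only [hmid]
      by_cases hle : ((lo + hi) / 2) * ((lo + hi) / 2) ≤ n
      · rw [if_pos hle]
        exact ih _ _ (by omega) (by omega) hle h2 (by omega)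
      · rw [if_neg hle]
        exact ih _ _ (by omega) h0 h1 (by omega) (by omega)
    · rw [if_neg hg]
      have hhi : hi = lo + 1 := by omega
      refine ⟨h0, h1, ?_⟩
      rw [← hhi]; exact h2

theorem isqrt_spec (n : Int) (hn : 0 ≤ n) :
    0 ≤ isqrt n ∧ isqrt n * isqrt n ≤ n ∧ n < (isqrt n + 1) * (isqrt n + 1) :=
  isqrtGo_spec n (n + 1 - 0).toNat 0 (n + 1) le_rfl le_rfl (by simpa using hn)
    (by nlinarith) (by omega)

-- the unique nonnegative square root: if 0 ≤ e and e*e = n then isqrt n = e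
theorem isqrt_eq (n e : Int) (he : 0 ≤ e) (h : e * e = n) : isqrt n = e := by
  obtain ⟨h0, h1, h2⟩ := isqrt_spec n (h ▸ mul_nonneg he he)
  nlinarith

theorem innerGo_none (s a : Int) : ∀ (k : Nat) (b : Int),
    (∀ b', b ≤ b' → b' ≤ PySem.Int.floordiv (s - a) 2 →
      a * a ≠ b' * b' + (s - a - b') * (s - a - b')) →
    innerGo s a k b = none := by
  intro k
  induction k with
  | zero => intro b h; rfl
  | succ k ih =>
    intro b h
    rw [innerGo]
    by_cases hb : b ≤ PySem.Int.floordiv (s - a) 2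
    · rw [if_pos hb]
      simp only [if_neg (h b le_rfl hb)]
      exact ih _ (fun b' h1 h2 => h b' (by omega) h2)
    · rw [if_neg hb]

theorem innerGo_found (s a : Int) : ∀ (k : Nat) (b b₀ : Int),
    (PySem.Int.floordiv (s - a) 2 + 1 - b).toNat ≤ k →
    b ≤ b₀ → b₀ ≤ PySem.Int.floordiv (s - a) 2 →
    a * a = b₀ * b₀ + (s - a - b₀) * (s - a - b₀) →
    (∀ b', b ≤ b' → b' < b₀ → a * a ≠ b' * b' + (s - a - b') * (s - a - b')) →
    innerGo s a k b = some (PySem.Int.toStr (a * b₀ * (s - a - b₀))) := by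
  intro k
  induction k with
  | zero => intro b b₀ hk hbb hb0 hP hfirst; omega
  | succ k ih =>
    intro b b₀ hk hbb hb0 hP hfirst
    rw [innerGo]
    rw [if_pos (by omega)]
    by_cases hEq : a * a = b * b + (s - a - b) * (s - a - b)
    · simp only [if_pos hEq]
      have hb : b = b₀ := by
        by_contra hne
        exact hfirst b le_rfl (by omega) hEq
      subst hb; rfl
    · simp only [if_neg hEq]
      have hbb' : b + 1 ≤ b₀ := by
        rcases eq_or_lt_of_le hbb with h | h
        · exact absurd (h ▸ hP) hEq
        · omega
      exact ih _ _ (by omega) hbb' hb0 hP (fun b' h1 h2 => hfirst b' (by omega) h2)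

theorem key (s a b' : Int) (hP : a * a = b' * b' + (s - a - b') * (s - a - b')) :
    ((s - a) - 2 * b') * ((s - a) - 2 * b') = 2 * a * a - (s - a) * (s - a) := by
  linear_combination (-2) * hP

-- A's inner scan computes exactly B's closed-form decision for one value of a
theorem step_eq (s a : Int) (_ha : 1 < a) :
    computeInner s a 1 =
      (if 2 * a * a - (s - a) * (s - a) < 0 then none
       else if isqrt (2 * a * a - (s - a) * (s - a)) * isqrt (2 * a * a - (s - a) * (s - a)) ≠ 2 * a * a - (s - a) * (s - a) then none
       else if PySem.Int.mod ((s - a) - isqrt (2 * a * a - (s - a) * (s - a))) 2 ≠ 0 then none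
       else if 1 ≤ PySem.Int.floordiv ((s - a) - isqrt (2 * a * a - (s - a) * (s - a))) 2 then
         some (PySem.Int.toStr (a * PySem.Int.floordiv ((s - a) - isqrt (2 * a * a - (s - a) * (s - a))) 2 *
           ((s - a) - PySem.Int.floordiv ((s - a) - isqrt (2 * a * a - (s - a) * (s - a))) 2)))
       else none) := by
  have hbr : ∀ b' : Int, b' ≤ PySem.Int.floordiv (s - a) 2 ↔ b' * 2 ≤ s - a :=
    fun b' => PySem.Int.le_floordiv_iff_mul_le (by norm_num)
  have pack : ∀ b' : Int, 1 ≤ b' → b' ≤ PySem.Int.floordiv (s - a) 2 →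
      a * a = b' * b' + (s - a - b') * (s - a - b') →
      ¬ 2 * a * a - (s - a) * (s - a) < 0 ∧
      isqrt (2 * a * a - (s - a) * (s - a)) = (s - a) - 2 * b' := by
    intro b' h1 h2 hP
    have he : 0 ≤ (s - a) - 2 * b' := by have := (hbr b').mp h2; omega
    have hk := key s a b' hP
    exact ⟨by nlinarith, isqrt_eq _ _ he hk⟩
  unfold computeInner
  split_ifs with h1 h2 h3 h4
  · -- disc < 0 : no solution can exist (it would make disc a square)
    refine innerGo_none s a _ 1 ?_
    intro b' hb1 hb2 hP
    have hk := key s a b' hP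
    nlinarith
  · -- disc is not a perfect square
    refine innerGo_none s a _ 1 ?_
    intro b' hb1 hb2 hP
    obtain ⟨-, hd⟩ := pack b' hb1 hb2 hP
    exact h2 (by rw [hd]; exact key s a b' hP)
  · -- m - d is odd
    refine innerGo_none s a _ 1 ?_
    intro b' hb1 hb2 hP
    obtain ⟨-, hd⟩ := pack b' hb1 hb2 hP
    apply h3
    rw [hd]
    have hx : s - a - (s - a - 2 * b') = 2 * b' := by ring
    rw [hx]
    exact (PySem.Int.mod_eq_zero_iff_dvd _ _).mpr ⟨b', by ring⟩
  · -- all of B's conditions hold: the scan finds exactly b₀ = (m - d)/2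
    set disc := 2 * a * a - (s - a) * (s - a) with hdisc
    have hdnn : 0 ≤ isqrt disc := (isqrt_spec disc (by omega)).1
    have hdd : isqrt disc * isqrt disc = disc := by omega
    set d := isqrt disc with hd
    have hdvd : (2 : Int) ∣ (s - a - d) := (PySem.Int.mod_eq_zero_iff_dvd _ _).mp (by omega)
    obtain ⟨q, hq⟩ := hdvd
    have hfl : PySem.Int.floordiv (s - a - d) 2 = q := by
      rw [hq, PySem.Int.floordiv_eq_ediv_of_pos (by norm_num)]
      omega
    rw [hfl] at h4 ⊢
    have hdq : d = s - a - 2 * q := by omega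
    have hdd2 : (s - a - 2 * q) * (s - a - 2 * q) = 2 * a * a - (s - a) * (s - a) := by
      rw [← hdq, hdd, hdisc]
    have hPq : a * a = q * q + (s - a - q) * (s - a - q) := by
      have h2' : 2 * (a * a) = 2 * (q * q + (s - a - q) * (s - a - q)) := by
        linear_combination (-1) * hdd2
      exact mul_left_cancel₀ two_ne_zero h2'
    have hq_le : q ≤ PySem.Int.floordiv (s - a) 2 := (hbr q).mpr (by omega)
    refine innerGo_found s a _ 1 q le_rfl h4 hq_le hPq ?_
    intro b' hb1 hb2 hP
    obtain ⟨-, hd'⟩ := pack b' hb1 (le_trans (le_of_lt hb2) hq_le) hP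
    have hb'd : s - a - 2 * b' = d := by rw [← hd']
    omega
  · -- the root exists but is below 1: the scan over b ≥ 1 finds nothing
    refine innerGo_none s a _ 1 ?_
    intro b' hb1 hb2 hP
    obtain ⟨-, hd⟩ := pack b' hb1 hb2 hP
    apply h4
    rw [hd]
    have hx : s - a - (s - a - 2 * b') = 2 * b' := by ring
    rw [hx, PySem.Int.floordiv_eq_ediv_of_pos (by norm_num)]
    omega

theorem outer_eq (s : Int) : ∀ (k : Nat) (a : Int), outerGo s k a = altGo s k a := by
  intro k
  induction k with
  | zero => intro a; rfl
  | succ k ih =>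
    intro a
    rw [outerGo, altGo]
    by_cases ha : a > 1
    · rw [if_pos ha, if_pos ha, step_eq s a ha]
      dsimp only
      split_ifs with h1 h2 h3 h4 <;> first | rfl | exact ih _
    · rw [if_neg ha, if_neg ha]

-- ===== VERDICT (by name: the statement is the Claim_ definition above) =====
theorem compute_spec : Claim_equal_compute := by
  intro s _
  unfold Spec_compute compute compute_alt
  exact outer_eq s (s - 2 - 1).toNat (s - 2)
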